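-- pv_equiv track=rewrite | github.com/DhruvaKumarS/Data-Mining | Apriori-Implementation-and-Association-Analysis/apriori_script.py | give_count_dict
-- ===== SOURCE A (Python) =====
-- def give_count_dict(transactions,subsetList):
--     accepted = {}
--     for subset in subsetList:
--         for row in range(len(transactions)):
--             if set(subset).issubset(transactions[row]):
--                 if not str(subset) in accepted:
--                     accepted[str(subset)] = 1
--                 else:
--                     accepted[str(subset)] += 1
--     return accepted
-- ===== SOURCE B (Python) =====
-- def give_count_dict(transactions, subsetList):
--     # Inverted index: item -> set of row indices containing it.
--     index = {}
--     for r, row in enumerate(transactions):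
--         for item in row:
--             index.setdefault(item, set()).add(r)
--     accepted = {}
--     for subset in subsetList:
--         rows = set(range(len(transactions)))
--         for item in subset:
--             rows &= index.get(item, set())
--         c = len(rows)
--         if c:
--             key = str(subset)
--             accepted[key] = accepted.get(key, 0) + c
--     return accepted
-- ===== Notes on version B (the rewrite author's own statement) =====
-- stated objective: faster
-- what changed: Replaces A's nested subset-by-row containment scan (which rebuilds set(subset) and tests it against every transaction for every subset) with an inverted index (item -> set of row indices) built in one pass; each subset's count is the size of the intersection of its items' row-index sets, accumulated into the result dict.
import Mathlib
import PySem

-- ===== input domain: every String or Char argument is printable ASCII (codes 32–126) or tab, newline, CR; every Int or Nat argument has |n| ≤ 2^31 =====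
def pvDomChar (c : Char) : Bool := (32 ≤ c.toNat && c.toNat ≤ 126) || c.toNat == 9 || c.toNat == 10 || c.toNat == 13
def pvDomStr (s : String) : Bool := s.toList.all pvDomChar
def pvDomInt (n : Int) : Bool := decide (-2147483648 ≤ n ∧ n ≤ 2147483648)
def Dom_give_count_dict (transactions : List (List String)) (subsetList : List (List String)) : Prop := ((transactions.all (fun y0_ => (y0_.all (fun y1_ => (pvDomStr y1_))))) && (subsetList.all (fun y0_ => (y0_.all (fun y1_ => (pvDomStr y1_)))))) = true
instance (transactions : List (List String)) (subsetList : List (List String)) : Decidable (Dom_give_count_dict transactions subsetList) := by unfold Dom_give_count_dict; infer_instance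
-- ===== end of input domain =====

-- B replaces A's subset×row nested containment scan by an inverted index (item → set of row
-- indices) whose per-subset intersection yields the count; objective: alternative decomposition.

-- shared helper: Python's str(subset) for a list of strings (repr of each string, exact on the
-- Dom character set: printable ASCII plus tab/newline/CR)
def pyReprChars (s : List Char) : List Char :=
  let q : Char := if s.contains '\'' && !(s.contains '"') then '"' else '\''
  q :: (s.flatMap (fun c =>
    if c = '\\' then ['\\', '\\']
    else if c = q then ['\\', q]
    else if c = '\n' then ['\\', 'n']
    else if c = '\r' then ['\\', 'r']
    else if c = '\t' then ['\\', 't']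
    else [c])) ++ [q]

def pyStrOfList (xs : List String) : String :=
  let inner : List Char :=
    match xs.map (fun s => pyReprChars s.toList) with
    | [] => []
    | r :: rs => r ++ rs.flatMap (fun t => ',' :: ' ' :: t)
  String.ofList ('[' :: inner ++ [']'])

-- ===== PORT A =====
def give_count_dict (transactions : List (List String)) (subsetList : List (List String)) : List (String × Int) :=
  let accepted : PySem.Dict String Int :=
    subsetList.foldl (fun accepted subset =>
      (PySem.List.pyRange 0 (PySem.List.len transactions) 1).foldl (fun accepted row =>
        if PySem.Set.issubset (PySem.Set.ofList subset) (PySem.List.pyGetD transactions row []) then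
          if accepted.contains (pyStrOfList subset) = false then
            accepted.insert (pyStrOfList subset) 1
          else
            accepted.insert (pyStrOfList subset) (accepted.getD (pyStrOfList subset) 0 + 1)
        else accepted) accepted) PySem.Dict.empty
  accepted.items

-- ===== PORT B =====
def give_count_dict_alt (transactions : List (List String)) (subsetList : List (List String)) : List (String × Int) :=
  let index : PySem.Dict String (PySem.Set Int) :=
    (PySem.List.enumerate transactions 0).foldl (fun index p =>
      p.2.foldl (fun index item =>
        index.modify item PySem.Set.empty (fun s => s.add p.1)) index) PySem.Dict.empty
  let accepted : PySem.Dict String Int :=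
    subsetList.foldl (fun accepted subset =>
      let rows : PySem.Set Int :=
        subset.foldl (fun rows item => PySem.Set.inter rows (index.getD item PySem.Set.empty))
          (PySem.Set.ofList (PySem.List.pyRange 0 (PySem.List.len transactions) 1))
      let c : Int := PySem.Set.len rows
      if c ≠ 0 then
        accepted.insert (pyStrOfList subset) (accepted.getD (pyStrOfList subset) 0 + c)
      else accepted) PySem.Dict.empty
  accepted.items

-- ===== PRECONDITION & SPEC =====
def Spec_give_count_dict (transactions : List (List String)) (subsetList : List (List String)) (out : List (String × Int)) : Prop := out = give_count_dict_alt transactions subsetList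
instance (transactions : List (List String)) (subsetList : List (List String)) (out : List (String × Int)) : Decidable (Spec_give_count_dict transactions subsetList out) := by unfold Spec_give_count_dict; infer_instance

-- ===== CLAIM (what is proved, stated in full; the proofs are below) =====
def Claim_equal_give_count_dict : Prop := ∀ (transactions : List (List String)) (subsetList : List (List String)), Dom_give_count_dict transactions subsetList → Spec_give_count_dict transactions subsetList (give_count_dict transactions subsetList)

-- ===== LEMMAS AND PROOFS =====

theorem foldl_if_insert_getD (p : Int → Bool) (k : String) (rs : List Int) (d : PySem.Dict String Int) :
    rs.foldl (fun acc r =>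
      if p r then
        if acc.contains k = false then acc.insert k 1
        else acc.insert k (acc.getD k 0 + 1)
      else acc) d
    = if rs.countP p = 0 then d else d.insert k (d.getD k 0 + (rs.countP p : Int)) := by
  induction rs generalizing d with
  | nil => simp
  | cons r rs ih =>
    simp only [List.foldl_cons, List.countP_cons]
    by_cases hp : p r
    · have hstep : (if d.contains k = false then d.insert k 1
          else d.insert k (d.getD k 0 + 1)) = d.insert k (d.getD k 0 + 1) := by
        by_cases hc : d.contains k = false
        · rw [if_pos hc, PySem.Dict.getD_of_not_contains d 0 hc]; norm_num
        · rw [if_neg hc]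
      rw [if_pos hp, hstep, ih]
      simp only [hp, if_pos]
      split
      · next h =>
        simp [h]
      · next h =>
        rw [PySem.Dict.getD_insert_self, PySem.Dict.insert_insert_self]
        congr 1
        push_cast
        ring
    · rw [if_neg hp, ih]
      simp [hp]

theorem foldl_inter_eq_filter (l : List String) (g : String → PySem.Set Int) (s0 : List Int) :
    l.foldl (fun rows item => PySem.Set.inter rows (g item)) s0
    = s0.filter (fun r => l.all (fun item => (g item).contains r)) := by
  induction l generalizing s0 with
  | nil => simp
  | cons x l ih =>
    simp only [List.foldl_cons, List.all_cons]
    rw [ih]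
    show (List.filter _ (List.filter _ s0)) = _
    rw [List.filter_filter]
    apply List.filter_congr
    intro r _
    exact Bool.and_comm _ _

theorem getD_index_inner (items : List String) (i : Int) (d : PySem.Dict String (PySem.Set Int))
    (item : String) (r : Int) :
    r ∈ (items.foldl (fun d x => d.modify x PySem.Set.empty (fun s => s.add i)) d).getD item PySem.Set.empty
    ↔ r ∈ d.getD item PySem.Set.empty ∨ (r = i ∧ item ∈ items) := by
  induction items generalizing d with
  | nil => simp
  | cons x items ih =>
    simp only [List.foldl_cons]
    rw [ih]
    rw [PySem.Dict.getD_modify]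
    by_cases hx : item = x
    · subst hx
      simp only [if_true, PySem.Set.mem_add, List.mem_cons]
      tauto
    · rw [if_neg hx]
      simp only [List.mem_cons]
      tauto

theorem getD_index (rows : List (List String)) (s : Int) (d : PySem.Dict String (PySem.Set Int))
    (item : String) (r : Int) :
    r ∈ ((PySem.List.enumerate rows s).foldl (fun d p =>
          p.2.foldl (fun d x => d.modify x PySem.Set.empty (fun s' => s'.add p.1)) d) d).getD item PySem.Set.empty
    ↔ r ∈ d.getD item PySem.Set.empty ∨ ∃ k : Nat, ∃ _ : k < rows.length, r = s + k ∧ item ∈ rows[k] := by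
  induction rows generalizing s d with
  | nil => simp [PySem.List.enumerate_nil]
  | cons row rows ih =>
    rw [PySem.List.enumerate_cons]
    simp only [List.foldl_cons]
    rw [ih, getD_index_inner]
    constructor
    · rintro ((h | ⟨rfl, hm⟩) | ⟨k, hk, rfl, hm⟩)
      · exact Or.inl h
      · exact Or.inr ⟨0, by simp, by simp, by simpa using hm⟩
      · exact Or.inr ⟨k + 1, by simpa using hk, by push_cast; ring, by simpa using hm⟩
    · rintro (h | ⟨k, hk, rfl, hm⟩)
      · exact Or.inl (Or.inl h)
      · cases k with
        | zero => exact Or.inl (Or.inr ⟨by simp, by simpa using hm⟩)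
        | succ k =>
          refine Or.inr ⟨k, by simpa using hk, by push_cast; ring, by simpa using hm⟩

theorem pred_eq (t : List (List String)) (subset : List String) (r : Int)
    (hr : 0 ≤ r ∧ r < (t.length : Int)) :
    subset.all (fun item =>
      (((PySem.List.enumerate t 0).foldl (fun d p =>
          p.2.foldl (fun d x => d.modify x PySem.Set.empty (fun s' => s'.add p.1)) d)
          PySem.Dict.empty).getD item PySem.Set.empty).contains r)
    = PySem.Set.issubset (PySem.Set.ofList subset) (PySem.List.pyGetD t r []) := by
  rw [Bool.eq_iff_iff, List.all_eq_true, PySem.Set.issubset_iff]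
  rw [PySem.List.pyGetD_eq_getElem t [] hr.1 hr.2]
  constructor
  · intro h x hx
    have := h x (by simpa using hx)
    rw [PySem.Set.contains_iff, getD_index] at this
    rcases this with h' | ⟨k, hk, hrk, hm⟩
    · rw [PySem.Dict.getD_empty] at h'
      simp [PySem.Set.empty] at h'
    · have : k = r.toNat := by omega
      subst this
      rw [PySem.Set.mem_ofList] at hx
      exact hm
  · intro h item hitem
    rw [PySem.Set.contains_iff, getD_index]
    refine Or.inr ⟨r.toNat, by omega, by omega, ?_⟩
    exact h item (by rw [PySem.Set.mem_ofList]; exact hitem)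

theorem step_eq (t : List (List String)) (acc : PySem.Dict String Int) (subset : List String) (k : String) :
    ((PySem.List.pyRange 0 (PySem.List.len t) 1).foldl (fun acc row =>
        if PySem.Set.issubset (PySem.Set.ofList subset) (PySem.List.pyGetD t row []) then
          if acc.contains k = false then acc.insert k 1
          else acc.insert k (acc.getD k 0 + 1)
        else acc) acc)
    = (if PySem.Set.len (subset.foldl (fun rows item =>
            PySem.Set.inter rows ((((PySem.List.enumerate t 0).foldl (fun d p =>
                p.2.foldl (fun d x => d.modify x PySem.Set.empty (fun s' => s'.add p.1)) d)
                PySem.Dict.empty).getD item PySem.Set.empty)))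
          (PySem.Set.ofList (PySem.List.pyRange 0 (PySem.List.len t) 1))) ≠ 0 then
        acc.insert k (acc.getD k 0 + PySem.Set.len (subset.foldl (fun rows item =>
            PySem.Set.inter rows ((((PySem.List.enumerate t 0).foldl (fun d p =>
                p.2.foldl (fun d x => d.modify x PySem.Set.empty (fun s' => s'.add p.1)) d)
                PySem.Dict.empty).getD item PySem.Set.empty)))
          (PySem.Set.ofList (PySem.List.pyRange 0 (PySem.List.len t) 1))))
      else acc) := by
  rw [foldl_if_insert_getD]
  rw [PySem.Set.ofList_eq_self_of_nodup _ (PySem.List.nodup_pyRange_one 0 (PySem.List.len t))]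
  rw [foldl_inter_eq_filter]
  have hlen : ∀ (q : Int → Bool),
      PySem.Set.len ((PySem.List.pyRange 0 (PySem.List.len t) 1).filter q)
      = ((PySem.List.pyRange 0 (PySem.List.len t) 1).countP q : Int) := by
    intro q
    simp [PySem.Set.len, List.countP_eq_length_filter]
  rw [hlen]
  have hcnt : (PySem.List.pyRange 0 (PySem.List.len t) 1).countP
        (fun r => subset.all (fun item =>
          (((PySem.List.enumerate t 0).foldl (fun d p =>
              p.2.foldl (fun d x => d.modify x PySem.Set.empty (fun s' => s'.add p.1)) d)
              PySem.Dict.empty).getD item PySem.Set.empty).contains r))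
      = (PySem.List.pyRange 0 (PySem.List.len t) 1).countP
        (fun r => PySem.Set.issubset (PySem.Set.ofList subset) (PySem.List.pyGetD t r [])) := by
    apply List.countP_congr
    intro r hr
    rw [PySem.List.mem_pyRange_one, PySem.List.len_eq] at hr
    rw [pred_eq t subset r hr]
  rw [hcnt]
  split
  · next h =>
    rw [if_neg (not_not_intro (by exact_mod_cast h))]
  · next h =>
    rw [if_pos (by exact_mod_cast h)]

-- ===== VERDICT (by name: the statement is the Claim_ definition above) =====
theorem give_count_dict_spec : Claim_equal_give_count_dict := by
  intro t s _
  unfold Spec_give_count_dict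
  simp only [give_count_dict, give_count_dict_alt]
  congr 1
  apply PySem.List.foldl_congr_mem
  intro acc subset _
  exact step_eq t acc subset (pyStrOfList subset)
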